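-- pv_equiv track=rewrite | github.com/rmclare445/WxFrame | wxframe/buoy.py | populate_obs
-- ===== SOURCE A (Python) =====
-- def populate_obs( vars_column, varsn, obsn ):
--     obs_column = ['---' for i in range(len(vars_column))]
--     for i in range(len(obsn)):
--         for j in range(len(vars_column)):
--             if varsn[i] == vars_column[j]:
--                 obs_column[j] = obsn[i]
--                 break
--     return obs_column
-- ===== SOURCE B (Python) =====
-- def populate_obs(vars_column, varsn, obsn):
--     val = {}
--     for n, o in zip(varsn, obsn):
--         val[n] = o
--     seen = set()
--     obs_column = []
--     for name in vars_column:
--         if name in seen: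
--             obs_column.append('---')
--         else:
--             seen.add(name)
--             obs_column.append(val.get(name, '---'))
--     return obs_column
-- ===== Notes on version B (the rewrite author's own statement) =====
-- stated objective: faster
-- what changed: B is column-driven: one pass over zip(varsn, obsn) builds a last-wins dict, then one pass over vars_column fills each first occurrence of a name from the dict (a seen-set leaves duplicate column names at '---', as A's break does), replacing A's per-observation nested scan of vars_column.
import Mathlib
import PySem

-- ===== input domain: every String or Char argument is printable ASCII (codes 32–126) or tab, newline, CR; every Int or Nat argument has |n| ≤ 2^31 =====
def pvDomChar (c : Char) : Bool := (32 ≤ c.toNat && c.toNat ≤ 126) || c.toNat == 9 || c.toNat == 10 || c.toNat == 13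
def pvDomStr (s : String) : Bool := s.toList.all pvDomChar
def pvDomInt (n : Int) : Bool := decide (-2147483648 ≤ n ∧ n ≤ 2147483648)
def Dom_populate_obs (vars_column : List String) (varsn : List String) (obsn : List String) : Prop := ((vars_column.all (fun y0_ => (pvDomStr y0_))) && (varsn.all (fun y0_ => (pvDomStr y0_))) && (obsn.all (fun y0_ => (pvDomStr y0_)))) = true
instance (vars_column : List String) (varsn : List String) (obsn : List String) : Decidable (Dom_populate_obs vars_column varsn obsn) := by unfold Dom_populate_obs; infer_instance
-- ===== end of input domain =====

-- B is column-driven (one last-wins dict pass over zip(varsn,obsn), then one seen-set pass over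
-- vars_column) instead of A's per-observation nested scan of vars_column (alternative algorithm).

-- ===== PORT A =====
-- inner loop: 'for j in range(len(vars_column)): if varsn[i] == vars_column[j]: obs_column[j] = obsn[i]; break'
def pvInnerA (vc : List String) (name o : String) : List Int → List String → List String
  | [], obs => obs
  | j :: js, obs =>
    if name == PySem.List.pyGetD vc j "" then obs.set j.toNat o
    else pvInnerA vc name o js obs

def populate_obs (vars_column : List String) (varsn : List String) (obsn : List String) : List String :=
  let obs_column := (PySem.List.pyRange 0 (vars_column.length : Int) 1).map (fun _ => "---")
  (PySem.List.pyRange 0 (obsn.length : Int) 1).foldl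
    (fun obs i =>
      pvInnerA vars_column (PySem.List.pyGetD varsn i "") (PySem.List.pyGetD obsn i "")
        (PySem.List.pyRange 0 (vars_column.length : Int) 1) obs)
    obs_column

-- ===== PORT B =====
def populate_obs_alt (vars_column : List String) (varsn : List String) (obsn : List String) : List String :=
  let val := (varsn.zip obsn).foldl
    (fun (d : PySem.Dict String String) p => d.insert p.1 p.2) PySem.Dict.empty
  (vars_column.foldl
    (fun (st : PySem.Set String × List String) name =>
      if PySem.Set.contains st.1 name then (st.1, st.2 ++ ["---"])
      else (PySem.Set.add st.1 name, st.2 ++ [PySem.Dict.getD val name "---"]))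
    (PySem.Set.empty, [])).2

-- ===== PRECONDITION & SPEC =====
-- Pre_ excludes exactly the inputs where A raises IndexError (varsn[i] for some i < len(obsn)
-- out of range, reached only when vars_column is non-empty).
def Pre_populate_obs (vars_column : List String) (varsn : List String) (obsn : List String) : Prop :=
  vars_column = [] ∨ obsn.length ≤ varsn.length
instance (vars_column : List String) (varsn : List String) (obsn : List String) : Decidable (Pre_populate_obs vars_column varsn obsn) := by unfold Pre_populate_obs; infer_instance

def pvWitness_populate_obs : List String × List String × List String :=
  (["WDIR", "WSPD", "WDIR"], ["WSPD", "PRES"], ["5.0", "1013"])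

def Spec_populate_obs (vars_column : List String) (varsn : List String) (obsn : List String) (out : List String) : Prop := out = populate_obs_alt vars_column varsn obsn
instance (vars_column : List String) (varsn : List String) (obsn : List String) (out : List String) : Decidable (Spec_populate_obs vars_column varsn obsn out) := by unfold Spec_populate_obs; infer_instance

-- ===== CLAIM (what is proved, stated in full; the proofs are below) =====
def Claim_equal_populate_obs : Prop := ∀ (vars_column : List String) (varsn : List String) (obsn : List String), Dom_populate_obs vars_column varsn obsn → Pre_populate_obs vars_column varsn obsn → Spec_populate_obs vars_column varsn obsn (populate_obs vars_column varsn obsn)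

-- ===== LEMMAS AND PROOFS =====

-- set one value at the first position of vc holding n (the effect of A's inner loop)
def writeFirst (n o : String) : List String → List String → List String
  | [], obs => obs
  | _ :: _, [] => []
  | m :: vr, x :: xr => if m = n then o :: xr else x :: writeFirst n o vr xr

-- column-driven reference output: first occurrence of each unseen name gets f name, rest "---"
def bRef (f : String → String) : PySem.Set String → List String → List String
  | _, [] => []
  | seen, n :: rest =>
    (if PySem.Set.contains seen n then "---" else f n) :: bRef f (PySem.Set.add seen n) rest

-- last-wins dictionary over the (name, obs) pairs; B's `val`
def lastDict (ps : List (String × String)) : PySem.Dict String String :=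
  ps.foldl (fun d p => d.insert p.1 p.2) PySem.Dict.empty

-- --- small PySem.Set facts, phrased through membership ---
theorem pvContains_false_iff (s : PySem.Set String) (x : String) :
    PySem.Set.contains s x = false ↔ x ∉ s := by
  rw [← Bool.not_eq_true, PySem.Set.contains_iff]

theorem pvContains_empty (x : String) :
    PySem.Set.contains (PySem.Set.empty : PySem.Set String) x = false := by
  rw [pvContains_false_iff]; simp [PySem.Set.empty]

theorem pvContains_add_self (s : PySem.Set String) (x : String) :
    PySem.Set.contains (PySem.Set.add s x) x = true := by
  rw [PySem.Set.contains_iff, PySem.Set.mem_add]; exact Or.inr rfl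

theorem pvContains_add_of_ne (s : PySem.Set String) (x m : String) (hne : x ≠ m)
    (h : PySem.Set.contains s x = false) :
    PySem.Set.contains (PySem.Set.add s m) x = false := by
  rw [pvContains_false_iff] at h ⊢
  rw [PySem.Set.mem_add]
  rintro (hs | he)
  · exact h hs
  · exact hne he

theorem pvContains_false_of_add (s : PySem.Set String) (x m : String)
    (h : PySem.Set.contains (PySem.Set.add s m) x = false) :
    PySem.Set.contains s x = false := by
  rw [pvContains_false_iff] at h ⊢
  exact fun hs => h ((PySem.Set.mem_add s m x).mpr (Or.inl hs))

theorem pvAdd_of_contains (s : PySem.Set String) (x : String)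
    (h : PySem.Set.contains s x = true) : PySem.Set.add s x = s := by
  have hm : x ∈ s := (PySem.Set.contains_iff s x).mp h
  simp [PySem.Set.add, hm]

-- --- writeFirst / bRef facts ---
theorem writeFirst_length (n o : String) (vc obs : List String) :
    (writeFirst n o vc obs).length = obs.length := by
  induction vc generalizing obs with
  | nil => rfl
  | cons m vr ih =>
    cases obs with
    | nil => rfl
    | cons x xr =>
      simp only [writeFirst]
      split <;> simp [ih]

theorem bRef_const (seen : PySem.Set String) (vc : List String) :
    bRef (fun _ => "---") seen vc = List.replicate vc.length "---" := by
  induction vc generalizing seen with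
  | nil => rfl
  | cons n rest ih => simp [bRef, ih, List.replicate_succ]

theorem bRef_congr (f g : String → String) (seen : PySem.Set String) (vc : List String)
    (h : ∀ x, PySem.Set.contains seen x = false → f x = g x) :
    bRef f seen vc = bRef g seen vc := by
  induction vc generalizing seen with
  | nil => rfl
  | cons n rest ih =>
    simp only [bRef]
    congr 1
    · by_cases hc : PySem.Set.contains seen n = true
      · have hm : n ∈ seen := (PySem.Set.contains_iff seen n).mp hc
        simp [hm]
      · simp only [Bool.not_eq_true] at hc
        have hm : n ∉ seen := (pvContains_false_iff seen n).mp hc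
        simp [hm, h n hc]
    · exact ih (PySem.Set.add seen n) (fun x hx => h x (pvContains_false_of_add _ _ _ hx))

theorem writeFirst_bRef (n o : String) (vc : List String) (seen : PySem.Set String)
    (f : String → String) (hn : PySem.Set.contains seen n = false) :
    writeFirst n o vc (bRef f seen vc)
      = bRef (fun x => if x = n then o else f x) seen vc := by
  induction vc generalizing seen with
  | nil => rfl
  | cons m rest ih =>
    by_cases hmn : m = n
    · subst hmn
      have hm : m ∉ seen := (pvContains_false_iff seen m).mp hn
      have h1 : bRef f seen (m :: rest) = f m :: bRef f (PySem.Set.add seen m) rest := by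
        simp [bRef, hm]
      have h2 : bRef (fun x => if x = m then o else f x) seen (m :: rest)
          = o :: bRef (fun x => if x = m then o else f x) (PySem.Set.add seen m) rest := by
        simp [bRef, hm]
      rw [h1, h2]
      have h3 : writeFirst m o (m :: rest) (f m :: bRef f (PySem.Set.add seen m) rest)
          = o :: bRef f (PySem.Set.add seen m) rest := by
        simp [writeFirst]
      rw [h3]
      refine congrArg _ ?_
      refine bRef_congr _ _ _ _ (fun x hx => ?_)
      have hxm : x ≠ m := by
        intro he; subst he
        rw [pvContains_add_self] at hx; exact Bool.true_eq_false.mp hx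
      rw [if_neg hxm]
    · have htail := ih (PySem.Set.add seen m) (pvContains_add_of_ne _ _ _ (Ne.symm hmn) hn)
      by_cases hc : PySem.Set.contains seen m = true
      · have hm : m ∈ seen := (PySem.Set.contains_iff seen m).mp hc
        have h1 : bRef f seen (m :: rest) = "---" :: bRef f (PySem.Set.add seen m) rest := by
          simp [bRef, hm]
        have h2 : bRef (fun x => if x = n then o else f x) seen (m :: rest)
            = "---" :: bRef (fun x => if x = n then o else f x) (PySem.Set.add seen m) rest := by
          simp [bRef, hm]
        rw [h1, h2]
        show (if m = n then o :: bRef f (PySem.Set.add seen m) rest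
            else "---" :: writeFirst n o rest (bRef f (PySem.Set.add seen m) rest)) = _
        rw [if_neg hmn, htail]
      · simp only [Bool.not_eq_true] at hc
        have hm : m ∉ seen := (pvContains_false_iff seen m).mp hc
        have h1 : bRef f seen (m :: rest) = f m :: bRef f (PySem.Set.add seen m) rest := by
          simp [bRef, hm]
        have h2 : bRef (fun x => if x = n then o else f x) seen (m :: rest)
            = f m :: bRef (fun x => if x = n then o else f x) (PySem.Set.add seen m) rest := by
          simp [bRef, hm, if_neg hmn]
        rw [h1, h2]
        show (if m = n then o :: bRef f (PySem.Set.add seen m) rest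
            else f m :: writeFirst n o rest (bRef f (PySem.Set.add seen m) rest)) = _
        rw [if_neg hmn, htail]

-- the A-side fold over pairs, characterised column-wise
theorem pvZipfold_bRef (vc : List String) (ps : List (String × String)) :
    ps.foldl (fun obs p => writeFirst p.1 p.2 vc obs) (List.replicate vc.length "---")
      = bRef (fun x => (lastDict ps).getD x "---") PySem.Set.empty vc := by
  induction ps using List.reverseRecOn with
  | nil =>
    have hf : (fun x => (lastDict []).getD x "---") = (fun _ : String => "---") := by
      funext x; exact PySem.Dict.getD_empty x "---"
    rw [List.foldl_nil, hf, bRef_const]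
  | append_singleton ps p ih =>
    rw [List.foldl_append, List.foldl_cons, List.foldl_nil, ih,
      writeFirst_bRef _ _ _ _ _ (pvContains_empty p.1)]
    refine bRef_congr _ _ _ _ (fun x _ => ?_)
    have hld : lastDict (ps ++ [p]) = (lastDict ps).insert p.1 p.2 := by
      simp [lastDict, List.foldl_append]
    rw [hld, PySem.Dict.getD_insert]

-- A's inner loop over range indices IS writeFirst (generalised over the start index)
theorem pvInnerA_spec (vc : List String) (n o : String) :
    ∀ (d k : Nat) (obs : List String), vc.length - k = d → k ≤ vc.length →
      obs.length = vc.length →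
      pvInnerA vc n o ((List.range d).map (fun i => ((k + i : Nat) : Int))) obs
        = obs.take k ++ writeFirst n o (vc.drop k) (obs.drop k) := by
  intro d
  induction d with
  | zero =>
    intro k obs hd hk hlen
    have hk' : k = vc.length := by omega
    subst hk'
    have h1 : vc.drop vc.length = [] := List.drop_eq_nil_of_le (le_refl _)
    rw [List.range_zero, List.map_nil]
    show obs = _
    rw [h1]
    show obs = obs.take vc.length ++ obs.drop vc.length
    rw [List.take_append_drop]
  | succ d ih =>
    intro k obs hd hk hlen
    have hklt : k < vc.length := by omega
    have hklt' : k < obs.length := by omega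
    have hmap : (List.range (d + 1)).map (fun i => ((k + i : Nat) : Int))
        = ((k : Nat) : Int) :: (List.range d).map (fun i => (((k + 1) + i : Nat) : Int)) := by
      rw [List.range_succ_eq_map, List.map_cons, List.map_map]
      exact congrArg₂ List.cons (by simp)
        (List.map_congr_left (fun i _ => by
          simp only [Function.comp_apply, Nat.succ_eq_add_one]; omega))
    rw [hmap]
    have hget : PySem.List.pyGetD vc ((k : Nat) : Int) "" = vc[k] := by
      rw [PySem.List.pyGetD_natCast]
      simp [List.getD, List.getElem?_eq_getElem hklt]
    have hdropv : vc.drop k = vc[k] :: vc.drop (k + 1) := List.drop_eq_getElem_cons hklt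
    have hdropo : obs.drop k = obs[k] :: obs.drop (k + 1) := List.drop_eq_getElem_cons hklt'
    by_cases hbeq : n = vc[k]
    · have hcond : (n == PySem.List.pyGetD vc ((k : Nat) : Int) "") = true := by
        rw [hget]; exact beq_iff_eq.mpr hbeq
      simp only [pvInnerA, hcond, if_true]
      have hset : obs.set (((k : Nat) : Int)).toNat o = obs.take k ++ o :: obs.drop (k + 1) := by
        rw [Int.toNat_natCast, List.set_eq_take_append_cons_drop, if_pos hklt']
      rw [hset, hdropv, hdropo]
      simp only [writeFirst, if_pos hbeq.symm]
    · have hcond : (n == PySem.List.pyGetD vc ((k : Nat) : Int) "") = false := by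
        rw [hget]; exact beq_eq_false_iff_ne.mpr hbeq
      simp only [pvInnerA, hcond, Bool.false_eq_true, if_false]
      rw [ih (k + 1) obs (by omega) (by omega) hlen]
      rw [hdropv, hdropo]
      rw [List.take_add_one, List.getElem?_eq_getElem hklt', Option.toList_some,
        List.append_assoc, List.singleton_append]
      simp only [writeFirst, if_neg (fun h : vc[k] = n => hbeq h.symm)]

theorem pvInnerA_zero (vc : List String) (n o : String) (obs : List String)
    (hlen : obs.length = vc.length) :
    pvInnerA vc n o (PySem.List.pyRange 0 (vc.length : Int) 1) obs = writeFirst n o vc obs := by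
  have h0 : PySem.List.pyRange 0 (vc.length : Int) 1
      = (List.range vc.length).map (fun i => ((0 + i : Nat) : Int)) := by
    rw [PySem.List.pyRange_zero_natCast]
    congr 1
    funext i
    simp
  rw [h0, pvInnerA_spec vc n o vc.length 0 obs (by omega) (by omega) hlen]
  simp

-- replace the inner loop by writeFirst throughout the pair fold
theorem pvFold_inner (vc : List String) (ps : List (String × String)) :
    ∀ obs : List String, obs.length = vc.length →
      ps.foldl (fun obs p =>
          pvInnerA vc p.1 p.2 (PySem.List.pyRange 0 (vc.length : Int) 1) obs) obs
        = ps.foldl (fun obs p => writeFirst p.1 p.2 vc obs) obs := by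
  induction ps with
  | nil => intro obs _; rfl
  | cons p pr ih =>
    intro obs hlen
    simp only [List.foldl_cons]
    rw [pvInnerA_zero vc p.1 p.2 obs hlen]
    exact ih _ (by rw [writeFirst_length]; exact hlen)

-- the fold over range(len(obsn)) with indexed lookups IS the fold over zip(varsn, obsn)
theorem pvFold_range_zip (g : List String → String → String → List String) :
    ∀ (vn on obs : List String), on.length ≤ vn.length →
      (List.range on.length).foldl (fun obs i => g obs (vn.getD i "") (on.getD i "")) obs
        = (vn.zip on).foldl (fun obs p => g obs p.1 p.2) obs := by
  intro vn on
  induction on generalizing vn with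
  | nil => intro obs _; simp
  | cons o tl ih =>
    intro obs h
    cases vn with
    | nil => simp at h
    | cons v vr =>
      simp only [List.length_cons, List.range_succ_eq_map, List.foldl_cons, List.foldl_map,
        List.getD_cons_zero, List.getD_cons_succ, List.zip_cons_cons, Nat.succ_eq_add_one]
      exact ih vr (g obs v o) (by simpa using h)

-- B's output loop, characterised as bRef
theorem pvB_loop (val : PySem.Dict String String) (vc : List String) :
    ∀ (seen : PySem.Set String) (acc : List String),
      (vc.foldl (fun (st : PySem.Set String × List String) name =>
          if PySem.Set.contains st.1 name then (st.1, st.2 ++ ["---"])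
          else (PySem.Set.add st.1 name, st.2 ++ [PySem.Dict.getD val name "---"]))
        (seen, acc)).2
      = acc ++ bRef (fun x => val.getD x "---") seen vc := by
  induction vc with
  | nil => intro seen acc; simp [bRef]
  | cons n rest ih =>
    intro seen acc
    simp only [List.foldl_cons]
    by_cases hc : PySem.Set.contains seen n = true
    · rw [if_pos hc, ih]
      simp only [bRef, hc, if_true]
      rw [pvAdd_of_contains seen n hc, List.append_assoc, List.singleton_append]
    · simp only [Bool.not_eq_true] at hc
      rw [if_neg (show ¬(PySem.Set.contains seen n = true) by
        rw [hc]; exact Bool.false_ne_true), ih]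
      simp only [bRef, hc, Bool.false_eq_true, if_false]
      rw [List.append_assoc, List.singleton_append]

theorem pvObs0 (L : Nat) :
    (PySem.List.pyRange 0 (L : Int) 1).map (fun _ => "---") = List.replicate L "---" := by
  rw [PySem.List.pyRange_zero_natCast, List.map_map]
  simp [Function.comp_def, List.map_const']

-- ===== VERDICT (by name: the statement is the Claim_ definition above) =====
theorem populate_obs_spec : Claim_equal_populate_obs := by
  intro vc vn on _ hpre
  unfold Spec_populate_obs
  rcases hpre with hvc | hle
  · subst hvc
    simp [populate_obs, populate_obs_alt, PySem.List.pyRange_one_eq_nil (le_refl 0), pvInnerA]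
  · show populate_obs vc vn on = populate_obs_alt vc vn on
    have hB : populate_obs_alt vc vn on
        = bRef (fun x => (lastDict (vn.zip on)).getD x "---") PySem.Set.empty vc := by
      simp only [populate_obs_alt, lastDict]
      rw [pvB_loop]
      simp
    rw [hB]
    simp only [populate_obs]
    rw [pvObs0, PySem.List.pyRange_zero_natCast on.length, List.foldl_map]
    simp only [PySem.List.pyGetD_natCast]
    rw [pvFold_range_zip (fun obs a b =>
        pvInnerA vc a b (PySem.List.pyRange 0 (vc.length : Int) 1) obs) vn on _ hle]
    rw [pvFold_inner vc (vn.zip on) _ (List.length_replicate)]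
    exact pvZipfold_bRef vc (vn.zip on)
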